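-- pv_equiv track=rewrite | github.com/sunwit/lexiconSubstitution | lexSub.py | rankName
-- ===== SOURCE A (Python) =====
-- def rankName(x):
--     lists = []
--     dictions = {}
--     rank = 0
--     for candi in x.keys():
--         if x[candi]  in lists:
--             dictions[candi] = rank
--         else:
--             rank = rank + 1
--             dictions[candi] = rank
--             lists.append(x[candi])
--     return dictions
-- ===== SOURCE B (Python) =====
-- def rankName(x):
--     items = list(x.items())
--     return {k: len({v for _, v in items[:i + 1]}) for i, (k, _) in enumerate(items)}
-- ===== Notes on version B (the rewrite author's own statement) =====
-- stated objective: alternative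
-- what changed: Replaces A's stateful single pass (explicit rank counter, if/else branch, growing list of seen values) with a stateless per-key closed form: the rank of the key at position i is the number of distinct values in the value prefix items[:i+1], recomputed independently for each key via a set comprehension.
import Mathlib
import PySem

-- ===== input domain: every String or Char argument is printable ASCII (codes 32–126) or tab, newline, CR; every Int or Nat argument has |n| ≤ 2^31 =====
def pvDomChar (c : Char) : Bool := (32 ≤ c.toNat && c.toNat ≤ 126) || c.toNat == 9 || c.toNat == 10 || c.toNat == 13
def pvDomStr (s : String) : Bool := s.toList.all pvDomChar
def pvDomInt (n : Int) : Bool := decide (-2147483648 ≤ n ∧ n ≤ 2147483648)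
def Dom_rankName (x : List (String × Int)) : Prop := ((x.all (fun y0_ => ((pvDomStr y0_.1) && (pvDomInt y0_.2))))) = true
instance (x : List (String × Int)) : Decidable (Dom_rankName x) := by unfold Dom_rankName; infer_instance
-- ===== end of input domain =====

-- B drops A's stateful loop (rank counter, if/else, growing list of seen values) and computes
-- each key's rank as a stateless closed form: the number of distinct values in the prefix
-- items[:i+1], recomputed per key. (objective: alternative; same result, no shared loop state)

-- ===== PORT A =====
-- for candi in x.keys(): membership test of x[candi] in lists; state (lists, dictions, rank)
def rankName (x : List (String × Int)) : List (String × Int) :=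
  (x.foldl
    (fun (st : List Int × PySem.Dict String Int × Int) p =>
      let (lists, dictions, rank) := st
      if p.2 ∈ lists then
        (lists, dictions.insert p.1 rank, rank)
      else
        (lists ++ [p.2], dictions.insert p.1 (rank + 1), rank + 1))
    ([], PySem.Dict.empty, 0)).2.1.items

-- ===== PORT B =====
-- {k: len({v for _, v in items[:i+1]}) for i, (k, _) in enumerate(items)}
-- items[:i+1] with the nonnegative enumerate index i is exactly take (i+1) (slice with
-- nonnegative stop); the dict comprehension is a fold of inserts over enumerate(items).
def rankName_alt (x : List (String × Int)) : List (String × Int) :=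
  ((PySem.List.enumerate x 0).foldl
    (fun (d : PySem.Dict String Int) ip =>
      d.insert ip.2.1
        (((PySem.Set.ofList ((x.take (ip.1.toNat + 1)).map Prod.snd)).length : Int)))
    PySem.Dict.empty).items

-- ===== PRECONDITION & SPEC =====
def Spec_rankName (x : List (String × Int)) (out : List (String × Int)) : Prop := out = rankName_alt x
instance (x : List (String × Int)) (out : List (String × Int)) : Decidable (Spec_rankName x out) := by unfold Spec_rankName; infer_instance

-- ===== CLAIM (what is proved, stated in full; the proofs are below) =====
def Claim_equal_rankName : Prop := ∀ (x : List (String × Int)), Dom_rankName x → Spec_rankName x (rankName x)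

-- ===== LEMMAS AND PROOFS =====

-- Loop invariant: after a prefix `pre`, A's `lists` is the ordered dedup of the prefix values
-- and `rank` is its length; B's insert at index |pre| uses the distinct count of take (|pre|+1).
theorem rankName_fold_eq (x : List (String × Int)) :
    ∀ (t pre : List (String × Int)) (d : PySem.Dict String Int), pre ++ t = x →
    (t.foldl
      (fun (st : List Int × PySem.Dict String Int × Int) p =>
        let (lists, dictions, rank) := st
        if p.2 ∈ lists then
          (lists, dictions.insert p.1 rank, rank)
        else
          (lists ++ [p.2], dictions.insert p.1 (rank + 1), rank + 1))
      (PySem.Set.ofList (pre.map Prod.snd), d,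
        ((PySem.Set.ofList (pre.map Prod.snd)).length : Int))).2.1
    = (PySem.List.enumerate t ((pre.length : Int))).foldl
        (fun (d : PySem.Dict String Int) ip =>
          d.insert ip.2.1
            (((PySem.Set.ofList ((x.take (ip.1.toNat + 1)).map Prod.snd)).length : Int)))
        d := by
  intro t
  induction t with
  | nil => intro pre d _; rfl
  | cons p t' ih =>
    intro pre d hx
    rw [PySem.List.enumerate_cons]
    simp only [List.foldl_cons]
    have htake : x.take ((pre.length : Int).toNat + 1) = pre ++ [p] := by
      subst hx
      rw [Int.toNat_natCast]
      rw [List.take_append]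
      simp
    have hsingle : PySem.Set.ofList ((pre ++ [p]).map Prod.snd)
        = PySem.Set.add (PySem.Set.ofList (pre.map Prod.snd)) p.2 := by
      rw [List.map_append]
      exact PySem.Set.ofList_append_singleton _ _
    have hmain := ih (pre ++ [p]) (d.insert p.1
        (((PySem.Set.ofList ((x.take ((pre.length : Int).toNat + 1)).map Prod.snd)).length : Int)))
        (by simpa using hx)
    by_cases h : p.2 ∈ PySem.Set.ofList (pre.map Prod.snd)
    · have hadd : PySem.Set.add (PySem.Set.ofList (pre.map Prod.snd)) p.2
          = PySem.Set.ofList (pre.map Prod.snd) := by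
        simp [PySem.Set.add, PySem.Set.contains, h]
      simp only [h, if_pos]
      rw [htake, hsingle, hadd] at hmain ⊢
      simpa [List.length_append] using hmain
    · simp only [h, if_neg, not_false_iff]
      have hadd : PySem.Set.add (PySem.Set.ofList (pre.map Prod.snd)) p.2
          = PySem.Set.ofList (pre.map Prod.snd) ++ [p.2] := by
        simp [PySem.Set.add, PySem.Set.contains, h]
      rw [htake, hsingle, hadd] at hmain ⊢
      have hlen : (((PySem.Set.ofList (pre.map Prod.snd) ++ [p.2]).length : Nat) : Int)
          = ((PySem.Set.ofList (pre.map Prod.snd)).length : Int) + 1 := by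
        simp
      rw [hlen] at hmain
      simpa [List.length_append] using hmain

-- ===== VERDICT (by name: the statement is the Claim_ definition above) =====
theorem rankName_spec : Claim_equal_rankName := by
  intro x _
  show rankName x = rankName_alt x
  unfold rankName rankName_alt
  have h := rankName_fold_eq x x [] PySem.Dict.empty rfl
  simpa [PySem.Set.ofList] using congrArg PySem.Dict.items h
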